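-- pv_equiv track=rewrite | github.com/AOL0311/friday_hw | roll_dice.py | analyze_dice
-- ===== SOURCE A (Python) =====
-- from collections import Counter, defaultdict
--
-- def analyze_dice(dice):
--     counts = Counter(dice)
--     count_values = sorted(counts.values(), reverse=True)
--     dice_sorted = sorted(dice, reverse=True)
--
--     if count_values == [4]:
--         point = dice[0]
--         detail = f'豹子({point})'
--         return ('豹子', point, detail)
--     elif count_values == [3, 1]:
--         point = dice_sorted[0]
--         detail = f'沒點 {point}大'
--         return ('沒點', point, detail)
--     elif count_values == [2, 2]:
--         point = sum([x for x, y in counts.items() if y == 2])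
--         detail = f'{point}點'
--         return ('有點', point, detail)
--     elif count_values == [2, 1, 1]:
--         point = sum([x for x, y in counts.items() if y == 1])
--         detail = f'{point}點'
--         return ('有點', point, detail)
--     else:
--         point = dice_sorted[0]
--         detail = f'沒點 {point}大'
--         return ('沒點', point, detail)
-- ===== SOURCE B (Python) =====
-- def analyze_dice(dice):
--     s = sorted(dice)
--     if len(s) == 4:
--         a, b, c, d = s
--         if a == d:
--             return ('豹子', a, f'豹子({a})')
--         if a == c or b == d:
--             return ('沒點', d, f'沒點 {d}大')
--         if a == b and c == d:
--             p = a + c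
--             return ('有點', p, f'{p}點')
--         if a == b:
--             p = c + d
--             return ('有點', p, f'{p}點')
--         if b == c:
--             p = a + d
--             return ('有點', p, f'{p}點')
--         if c == d:
--             p = a + b
--             return ('有點', p, f'{p}點')
--     p = s[-1]
--     return ('沒點', p, f'沒點 {p}大')
-- ===== Notes on version B (the rewrite author's own statement) =====
-- stated objective: idiomatic
-- what changed: B drops the Counter/sorted-count-values pattern matching entirely: it sorts the dice ascending once and classifies by adjacent-position equality comparisons, reading the pair/single faces straight off the sorted positions.
-- outside the precondition, e.g. on analyze_dice([]): A raises IndexError, B raises IndexError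
import Mathlib
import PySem

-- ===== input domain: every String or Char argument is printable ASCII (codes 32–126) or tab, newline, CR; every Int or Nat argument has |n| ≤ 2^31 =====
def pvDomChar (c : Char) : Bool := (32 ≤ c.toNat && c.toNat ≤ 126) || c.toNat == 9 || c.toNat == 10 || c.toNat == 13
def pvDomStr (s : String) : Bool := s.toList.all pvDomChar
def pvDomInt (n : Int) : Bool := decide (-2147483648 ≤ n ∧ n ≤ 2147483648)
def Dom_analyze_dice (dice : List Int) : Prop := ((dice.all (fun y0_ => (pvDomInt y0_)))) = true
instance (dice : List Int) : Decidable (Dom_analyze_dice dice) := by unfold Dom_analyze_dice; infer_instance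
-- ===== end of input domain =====

-- B replaces A's Counter bookkeeping by run-length classification on the ascending sorted
-- list (idiomatic adjacent-position comparisons); return values are proved identical on
-- every non-empty list.

-- ===== PORT A =====
-- literal transliteration of A (Counter + sorted count-values pattern match)
def analyze_dice (dice : List Int) : String × Int × String :=
  let counts := PySem.Dict.counter dice
  let count_values := PySem.List.sorted counts.values (fun x => x) true
  let dice_sorted := PySem.List.sorted dice (fun x => x) true
  if count_values = [4] then
    let point := (PySem.List.pyGet? dice 0).getD 0   -- dice[0]; Pre_ excludes the empty list
    ("豹子", point, "豹子(" ++ PySem.Int.toStr point ++ ")")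
  else if count_values = [3, 1] then
    let point := (PySem.List.pyGet? dice_sorted 0).getD 0
    ("沒點", point, "沒點 " ++ PySem.Int.toStr point ++ "大")
  else if count_values = [2, 2] then
    let point := ((counts.items.filter (fun p => p.2 == 2)).map (fun p => p.1)).sum
    ("有點", point, PySem.Int.toStr point ++ "點")
  else if count_values = [2, 1, 1] then
    let point := ((counts.items.filter (fun p => p.2 == 1)).map (fun p => p.1)).sum
    ("有點", point, PySem.Int.toStr point ++ "點")
  else
    let point := (PySem.List.pyGet? dice_sorted 0).getD 0
    ("沒點", point, "沒點 " ++ PySem.Int.toStr point ++ "大")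

-- ===== PORT B =====
-- literal transliteration of Source B: sort ascending, classify by adjacent equalities;
-- the early returns of the len==4 block become an Option, none = fall through.
def analyze_dice_alt (dice : List Int) : String × Int × String :=
  let s := PySem.List.sorted dice (fun x => x) false
  let early : Option (String × Int × String) :=
    match s with
    | [a, b, c, d] =>
      if a = d then some ("豹子", a, "豹子(" ++ PySem.Int.toStr a ++ ")")
      else if a = c ∨ b = d then some ("沒點", d, "沒點 " ++ PySem.Int.toStr d ++ "大")
      else if a = b ∧ c = d then
        let p := a + c
        some ("有點", p, PySem.Int.toStr p ++ "點")
      else if a = b then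
        let p := c + d
        some ("有點", p, PySem.Int.toStr p ++ "點")
      else if b = c then
        let p := a + d
        some ("有點", p, PySem.Int.toStr p ++ "點")
      else if c = d then
        let p := a + b
        some ("有點", p, PySem.Int.toStr p ++ "點")
      else none
    | _ => none
  match early with
  | some r => r
  | none =>
    let p := (PySem.List.pyGet? s (-1)).getD 0   -- s[-1]; Pre_ excludes the empty list
    ("沒點", p, "沒點 " ++ PySem.Int.toStr p ++ "大")

-- ===== PRECONDITION & SPEC =====
-- Pre_ excludes only the empty list, on which both Pythons raise IndexError (dice[0]/s[-1]).
def Pre_analyze_dice (dice : List Int) : Prop := dice ≠ []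
instance (dice : List Int) : Decidable (Pre_analyze_dice dice) := by unfold Pre_analyze_dice; infer_instance
def pvWitness_analyze_dice : List Int := [3, 3, 5, 2]

def Spec_analyze_dice (dice : List Int) (out : String × Int × String) : Prop := out = analyze_dice_alt dice
instance (dice : List Int) (out : String × Int × String) : Decidable (Spec_analyze_dice dice out) := by unfold Spec_analyze_dice; infer_instance

-- ===== CLAIM (what is proved, stated in full; the proofs are below) =====
def Claim_equal_analyze_dice : Prop := ∀ (dice : List Int), Dom_analyze_dice dice → Pre_analyze_dice dice → Spec_analyze_dice dice (analyze_dice dice)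


-- ===== LEMMAS AND PROOFS =====

-- descending sort of two lists with the same multiset agree
theorem pv_sortedRev_eq_of_perm (l l' : List Int) (h : l.Perm l') :
    PySem.List.sorted l (fun x => x) true = PySem.List.sorted l' (fun x => x) true := by
  have h1 := PySem.List.sorted_perm l (fun x => x) true
  have h2 := PySem.List.sorted_perm l' (fun x => x) true
  exact ((h1.trans h).trans h2.symm).eq_of_pairwise (fun a b _ _ hab hba => le_antisymm hba hab)
    (PySem.List.sorted_pairwise_rev l (fun x => x)) (PySem.List.sorted_pairwise_rev l' (fun x => x))

-- descending sort of an ascending-sorted list is its reverse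
theorem pv_sortedRev_of_pairwise (s : List Int) (hs : s.Pairwise (· ≤ ·)) :
    PySem.List.sorted s (fun x => x) true = s.reverse := by
  have hp : (PySem.List.sorted s (fun x => x) true).Perm s.reverse :=
    (PySem.List.sorted_perm s (fun x => x) true).trans (List.reverse_perm s).symm
  have s2 : s.reverse.Pairwise (fun a b : Int => b ≤ a) := by
    simpa [List.pairwise_reverse] using hs
  exact hp.eq_of_pairwise (fun a b _ _ hab hba => le_antisymm hba hab)
    (PySem.List.sorted_pairwise_rev s (fun x => x)) s2

-- Counter's values list is the counts of the distinct elements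
theorem pv_values_counter (l : List Int) :
    (PySem.Dict.counter l).values = (PySem.Set.ofList l).map (fun k => (l.count k : Int)) := by
  simp only [PySem.Dict.values, PySem.Dict.items_counter, List.map_map]; rfl

-- counter values sum to the length of the list
theorem pv_values_sum (l : List Int) : (PySem.Dict.counter l).values.sum = l.length := by
  rw [pv_values_counter]
  have hperm : (PySem.Set.ofList l).Perm l.dedup := by
    rw [List.perm_ext_iff_of_nodup (PySem.Set.nodup_ofList l) l.nodup_dedup]
    intro a; simp [PySem.Set.mem_ofList]
  rw [(hperm.map (fun k => (l.count k : Int))).sum_eq]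
  rw [show (fun k => ((List.count k l : Nat) : Int)) = (Nat.cast : Nat → Int) ∘ (fun x => l.count x) from rfl,
      ← List.map_map, (Nat.cast_list_sum _).symm, List.sum_map_count_dedup_eq_length]

-- counters of permuted lists have permuted item lists
theorem pv_items_perm (l l' : List Int) (h : l.Perm l') :
    (PySem.Dict.counter l).items.Perm (PySem.Dict.counter l').items := by
  rw [PySem.Dict.items_counter, PySem.Dict.items_counter]
  have h2 : (PySem.Set.ofList l').map (fun k => (k, (l.count k : Int)))
      = (PySem.Set.ofList l').map (fun k => (k, (l'.count k : Int))) := by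
    apply List.map_congr_left; intro k _; rw [h.count_eq]
  refine h2 ▸ (List.Perm.map _ ?_)
  rw [List.perm_ext_iff_of_nodup (PySem.Set.nodup_ofList l) (PySem.Set.nodup_ofList l')]
  intro a; simp [PySem.Set.mem_ofList, h.mem_iff]

-- if the sorted counter values are [4], all elements of the list coincide
theorem pv_all_eq_of_cv4 (l : List Int)
    (h : PySem.List.sorted (PySem.Dict.counter l).values (fun x => x) true = [(4:Int)]) :
    ∀ x ∈ l, ∀ y ∈ l, x = y := by
  have hperm : (PySem.Dict.counter l).values.Perm [(4:Int)] :=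
    h ▸ (PySem.List.sorted_perm (PySem.Dict.counter l).values (fun x => x) true).symm
  have hv : (PySem.Dict.counter l).values = [(4:Int)] := List.perm_singleton.mp hperm
  have hv2 : (PySem.Set.ofList l).map (fun k => (l.count k : Int)) = [(4:Int)] := by
    rw [← pv_values_counter, hv]
  rcases List.map_eq_singleton_iff.mp hv2 with ⟨k, hk, -⟩
  intro x hx y hy
  have hx' : x ∈ PySem.Set.ofList l := (PySem.Set.mem_ofList _ _).mpr hx
  have hy' : y ∈ PySem.Set.ofList l := (PySem.Set.mem_ofList _ _).mpr hy
  rw [hk] at hx' hy'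
  simp at hx' hy'
  rw [hx', hy']

-- A is invariant under sorting its input (needs nonemptiness for the dice[0] branch)
theorem pv_A_sorted (dice : List Int) (hne : dice ≠ []) :
    analyze_dice dice = analyze_dice (PySem.List.sorted dice (fun x => x) false) := by
  set s := PySem.List.sorted dice (fun x => x) false with hs
  have hperm : s.Perm dice := PySem.List.sorted_perm dice (fun x => x) false
  have hip := pv_items_perm dice s hperm.symm
  have hv : (PySem.Dict.counter dice).values.Perm (PySem.Dict.counter s).values := hip.map _
  have hcv : PySem.List.sorted (PySem.Dict.counter dice).values (fun x => x) true
      = PySem.List.sorted (PySem.Dict.counter s).values (fun x => x) true :=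
    pv_sortedRev_eq_of_perm _ _ hv
  have hds : PySem.List.sorted dice (fun x => x) true = PySem.List.sorted s (fun x => x) true :=
    pv_sortedRev_eq_of_perm _ _ hperm.symm
  have hsum2 : (((PySem.Dict.counter dice).items.filter (fun p => p.2 == 2)).map (fun p => p.1)).sum
      = (((PySem.Dict.counter s).items.filter (fun p => p.2 == 2)).map (fun p => p.1)).sum :=
    ((hip.filter _).map _).sum_eq
  have hsum1 : (((PySem.Dict.counter dice).items.filter (fun p => p.2 == 1)).map (fun p => p.1)).sum
      = (((PySem.Dict.counter s).items.filter (fun p => p.2 == 1)).map (fun p => p.1)).sum :=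
    ((hip.filter _).map _).sum_eq
  simp only [analyze_dice, hcv, hds, hsum1, hsum2]
  split_ifs with h4
  case _ =>
    have hall := pv_all_eq_of_cv4 s h4
    rcases dice with _ | ⟨x, t⟩
    · exact absurd rfl hne
    rcases hs' : s with _ | ⟨y, t'⟩
    · rw [hs'] at hperm
      exact absurd hperm.nil_eq.symm (List.cons_ne_nil x t)
    have hx : x ∈ s := hperm.symm.subset (List.mem_cons_self)
    have hy : y ∈ s := hs' ▸ List.mem_cons_self
    have : x = y := hall x hx y hy
    simp [this]
  all_goals rfl







-- sorted counter values cannot match a pattern summing to 4 unless the list has length 4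
theorem pv_cv_ne (s : List Int) (pat : List Int) (hsum : pat.sum = 4) (hlen : s.length ≠ 4) :
    PySem.List.sorted (PySem.Dict.counter s).values (fun x => x) true ≠ pat := by
  intro h
  have hperm : (PySem.Dict.counter s).values.Perm pat :=
    h ▸ (PySem.List.sorted_perm (PySem.Dict.counter s).values (fun x => x) true).symm
  have := pv_values_sum s
  rw [hperm.sum_eq, hsum] at this
  omega

-- A's fall-through point (max via descending sort) equals B's s[-1] on a sorted list
theorem pv_fallback (s : List Int) (hs : s.Pairwise (· ≤ ·)) :
    ((PySem.List.pyGet? (PySem.List.sorted s (fun x => x) true) 0).getD 0 : Int)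
      = (PySem.List.pyGet? s (-1)).getD 0 := by
  rw [pv_sortedRev_of_pairwise s hs, PySem.List.pyGet?_zero, PySem.List.pyGet?_neg_one,
      ← List.head?_eq_getElem?, List.head?_reverse]

-- on a nonempty ascending-sorted list, A agrees with B
theorem pv_A_eq_B_sorted (s : List Int) (hne : s ≠ []) (hs : s.Pairwise (· ≤ ·)) :
    analyze_dice s = analyze_dice_alt s := by
  have hself : PySem.List.sorted s (fun x => x) false = s :=
    PySem.List.sorted_eq_self_of_pairwise s (fun x => x) (by simpa using hs)
  -- length ≠ 4: A falls through all Counter patterns, B falls through the len==4 block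
  have fall : s.length ≠ 4 → analyze_dice s = analyze_dice_alt s := by
    intro hlen
    have hmatch : (match s with
        | [a, b, c, d] =>
          if a = d then some (("豹子", a, "豹子(" ++ PySem.Int.toStr a ++ ")") : String × Int × String)
          else if a = c ∨ b = d then some ("沒點", d, "沒點 " ++ PySem.Int.toStr d ++ "大")
          else if a = b ∧ c = d then
            let p := a + c
            some ("有點", p, PySem.Int.toStr p ++ "點")
          else if a = b then
            let p := c + d
            some ("有點", p, PySem.Int.toStr p ++ "點")
          else if b = c then
            let p := a + d
            some ("有點", p, PySem.Int.toStr p ++ "點")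
          else if c = d then
            let p := a + b
            some ("有點", p, PySem.Int.toStr p ++ "點")
          else none
        | _ => none) = none := by
      match s, hlen with
      | [], _ => rfl
      | [a], _ => rfl
      | [a, b], _ => rfl
      | [a, b, c], _ => rfl
      | [a, b, c, d], h => exact absurd (by simp : ([a,b,c,d] : List Int).length = 4) h
      | (a :: b :: c :: d :: e :: r), _ => rfl
    simp only [analyze_dice, analyze_dice_alt, hself,
      if_neg (pv_cv_ne _ [4] (by decide) hlen),
      if_neg (pv_cv_ne _ [3, 1] (by decide) hlen),
      if_neg (pv_cv_ne _ [2, 2] (by decide) hlen),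
      if_neg (pv_cv_ne _ [2, 1, 1] (by decide) hlen), hmatch]
    rw [pv_fallback _ hs]
  match s, hne with
  | [a], _ => exact fall (by simp)
  | [a, b], _ => exact fall (by simp)
  | [a, b, c], _ => exact fall (by simp)
  | (a :: b :: c :: d :: e :: r), _ => exact fall (by simp)
  | [a, b, c, d], _ =>
    have hab : a ≤ b := by simp at hs; omega
    have hbc : b ≤ c := by simp at hs; omega
    have hcd : c ≤ d := by simp at hs; omega
    by_cases e1 : a = b <;> by_cases e2 : b = c <;> by_cases e3 : c = d
    · -- a=b=c=d : four of a kind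
      subst e1; subst e2; subst e3
      have hofl : PySem.Set.ofList [a, a, a, a] = [a] := by
        simp [PySem.Set.ofList, PySem.Set.add, PySem.Set.contains]
      have hcv : PySem.List.sorted (PySem.Dict.counter [a, a, a, a]).values (fun x => x) true = [4] := by
        rw [pv_values_counter, hofl]; simp [List.count_cons]; rfl
      simp only [analyze_dice, analyze_dice_alt, hcv, hself]
      norm_num [PySem.List.pyGet?_zero_cons]
    · -- a=b=c<d : three of a kind
      subst e1; subst e2
      have h3 : a ≠ d := by omega
      have hofl : PySem.Set.ofList [a, a, a, d] = [a, d] := by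
        simp [PySem.Set.ofList, PySem.Set.add, PySem.Set.contains, h3.symm]
      have hcv : PySem.List.sorted (PySem.Dict.counter [a, a, a, d]).values (fun x => x) true = [3, 1] := by
        rw [pv_values_counter, hofl]; simp [List.count_cons, h3, h3.symm]; rfl
      simp only [analyze_dice, analyze_dice_alt, hcv, hself,
        pv_sortedRev_of_pairwise _ hs]
      norm_num [PySem.List.pyGet?_zero_cons, h3]
    · -- a=b<c=d : two pairs
      subst e1; subst e3
      have h1 : a ≠ c := e2
      have hofl : PySem.Set.ofList [a, a, c, c] = [a, c] := by
        simp [PySem.Set.ofList, PySem.Set.add, PySem.Set.contains, h1.symm]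
      have hitems : (PySem.Dict.counter [a, a, c, c]).items = [(a, 2), (c, 2)] := by
        rw [PySem.Dict.items_counter, hofl]
        simp [List.count_cons, h1, h1.symm]
      have hcv : PySem.List.sorted (PySem.Dict.counter [a, a, c, c]).values (fun x => x) true = [2, 2] := by
        rw [pv_values_counter, hofl]; simp [List.count_cons, h1, h1.symm]; rfl
      simp only [analyze_dice, analyze_dice_alt, hcv, hitems, hself]
      norm_num [h1]
    · -- a=b<c<d : one (low) pair
      subst e1
      have h1 : a ≠ c := e2
      have h3 : c ≠ d := e3
      have h2 : a ≠ d := by omega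
      have hofl : PySem.Set.ofList [a, a, c, d] = [a, c, d] := by
        simp [PySem.Set.ofList, PySem.Set.add, PySem.Set.contains, h1.symm, h2.symm, h3.symm]
      have hitems : (PySem.Dict.counter [a, a, c, d]).items = [(a, 2), (c, 1), (d, 1)] := by
        rw [PySem.Dict.items_counter, hofl]
        simp [List.count_cons, h1, h2, h3, h1.symm, h2.symm, h3.symm]
      have hcv : PySem.List.sorted (PySem.Dict.counter [a, a, c, d]).values (fun x => x) true = [2, 1, 1] := by
        rw [pv_values_counter, hofl]; simp [List.count_cons, h1, h2, h3, h1.symm, h2.symm, h3.symm]; rfl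
      simp only [analyze_dice, analyze_dice_alt, hcv, hitems, hself]
      norm_num [h1, h2, h3]
    · -- a<b=c=d : three of a kind (high)
      subst e2; subst e3
      have h1 : a ≠ b := e1
      have hofl : PySem.Set.ofList [a, b, b, b] = [a, b] := by
        simp [PySem.Set.ofList, PySem.Set.add, PySem.Set.contains, h1.symm]
      have hcv : PySem.List.sorted (PySem.Dict.counter [a, b, b, b]).values (fun x => x) true = [3, 1] := by
        rw [pv_values_counter, hofl]; simp [List.count_cons, h1, h1.symm]; rfl
      simp only [analyze_dice, analyze_dice_alt, hcv, hself,
        pv_sortedRev_of_pairwise _ hs]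
      norm_num [PySem.List.pyGet?_zero_cons, h1]
    · -- a<b=c<d : one (middle) pair
      subst e2
      have h1 : a ≠ b := e1
      have h3 : b ≠ d := e3
      have h2 : a ≠ d := by omega
      have hofl : PySem.Set.ofList [a, b, b, d] = [a, b, d] := by
        simp [PySem.Set.ofList, PySem.Set.add, PySem.Set.contains, h1.symm, h2.symm, h3.symm]
      have hitems : (PySem.Dict.counter [a, b, b, d]).items = [(a, 1), (b, 2), (d, 1)] := by
        rw [PySem.Dict.items_counter, hofl]
        simp [List.count_cons, h1, h2, h3, h1.symm, h2.symm, h3.symm]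
      have hcv : PySem.List.sorted (PySem.Dict.counter [a, b, b, d]).values (fun x => x) true = [2, 1, 1] := by
        rw [pv_values_counter, hofl]; simp [List.count_cons, h1, h2, h3, h1.symm, h2.symm, h3.symm]; rfl
      simp only [analyze_dice, analyze_dice_alt, hcv, hitems, hself]
      norm_num [h1, h2, h3]
    · -- a<b<c=d : one (high) pair
      subst e3
      have h1 : a ≠ b := e1
      have h3 : b ≠ c := e2
      have h2 : a ≠ c := by omega
      have hofl : PySem.Set.ofList [a, b, c, c] = [a, b, c] := by
        simp [PySem.Set.ofList, PySem.Set.add, PySem.Set.contains, h1.symm, h2.symm, h3.symm]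
      have hitems : (PySem.Dict.counter [a, b, c, c]).items = [(a, 1), (b, 1), (c, 2)] := by
        rw [PySem.Dict.items_counter, hofl]
        simp [List.count_cons, h1, h2, h3, h1.symm, h2.symm, h3.symm]
      have hcv : PySem.List.sorted (PySem.Dict.counter [a, b, c, c]).values (fun x => x) true = [2, 1, 1] := by
        rw [pv_values_counter, hofl]; simp [List.count_cons, h1, h2, h3, h1.symm, h2.symm, h3.symm]; rfl
      simp only [analyze_dice, analyze_dice_alt, hcv, hitems, hself]
      norm_num [h1, h2, h3]
    · -- all distinct: fall through on both sides
      have h1 : a ≠ b := e1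
      have h2 : b ≠ c := e2
      have h3 : c ≠ d := e3
      have h4 : a ≠ c := by omega
      have h5 : a ≠ d := by omega
      have h6 : b ≠ d := by omega
      have hofl : PySem.Set.ofList [a, b, c, d] = [a, b, c, d] := by
        simp [PySem.Set.ofList, PySem.Set.add, PySem.Set.contains, h1.symm, h2.symm, h3.symm,
          h4.symm, h5.symm, h6.symm]
      have hcv : PySem.List.sorted (PySem.Dict.counter [a, b, c, d]).values (fun x => x) true
          = [1, 1, 1, 1] := by
        rw [pv_values_counter, hofl]
        simp [List.count_cons, h1, h2, h3, h4, h5, h6, h1.symm, h2.symm, h3.symm, h4.symm,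
          h5.symm, h6.symm]
        rfl
      simp only [analyze_dice, analyze_dice_alt, hcv, hself,
        pv_sortedRev_of_pairwise _ hs]
      norm_num [PySem.List.pyGet?_zero_cons, PySem.List.pyGet?_neg_one, h1, h2, h3, h4, h5, h6]

-- B only looks at the sorted input
theorem pv_B_sorted (dice : List Int) :
    analyze_dice_alt (PySem.List.sorted dice (fun x => x) false) = analyze_dice_alt dice := by
  simp only [analyze_dice_alt, PySem.List.sorted_sorted]

-- ===== VERDICT (by name: the statement is the Claim_ definition above) =====
theorem analyze_dice_spec : Claim_equal_analyze_dice := by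
  intro dice _ hpre
  unfold Spec_analyze_dice
  have hne : PySem.List.sorted dice (fun x => x) false ≠ [] := by
    simpa [PySem.List.sorted_eq_nil_iff] using hpre
  rw [pv_A_sorted dice hpre,
      pv_A_eq_B_sorted _ hne (by simpa using PySem.List.sorted_pairwise dice (fun x => x)),
      pv_B_sorted]
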